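-- pv_equiv track=rewrite | github.com/Wongsawat/teda | scripts/data-extraction/extract_payment_terms_type_code_data.py | categorize_payment_terms
-- ===== SOURCE A (Python) =====
-- def categorize_payment_terms(code, name, description):
--     """Categorize payment terms codes based on their purpose"""
--
--     text = (name + ' ' + description).lower()
--
--     # Define categories based on common patterns
--     if any(word in text for word in ['discount', 'rebate']):
--         return 'Discount Terms'
--     elif any(word in text for word in ['penalty', 'interest', 'late']):
--         return 'Penalty Terms'
--     elif any(word in text for word in ['instant', 'immediate', 'receipt', 'delivery', 'cod']):
--         return 'Immediate Payment'
--     elif any(word in text for word in ['deferred', 'extended', 'postponed']):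
--         return 'Deferred Payment'
--     elif any(word in text for word in ['end of month', 'days after', 'proximo', 'fixed date']):
--         return 'Scheduled Payment'
--     elif any(word in text for word in ['letter of credit', 'documentary credit']):
--         return 'Letter of Credit'
--     elif any(word in text for word in ['cash', 'certified cheque', 'cheque']):
--         return 'Cash/Cheque Payment'
--     elif any(word in text for word in ['bill of exchange', 'promissory note', 'draft']):
--         return 'Trade Instruments'
--     elif any(word in text for word in ['factoring', 'factor']):
--         return 'Factoring'
--     elif any(word in text for word in ['installment', 'instalment', 'stage payment', 'progressive']):
--         return 'Installment Payment'
--     elif any(word in text for word in ['advance', 'prepay', 'deposit']):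
--         return 'Advance Payment'
--     elif any(word in text for word in ['against statement', 'against documents']):
--         return 'Documentary Payment'
--     elif any(word in text for word in ['lump sum', 'fixed fee']):
--         return 'Fixed Payment'
--     elif any(word in text for word in ['basic', 'normal', 'standard']):
--         return 'Standard Terms'
--     elif any(word in text for word in ['mixed', 'elective', 'mutually defined']):
--         return 'Custom Terms'
--     else:
--         return 'Other Terms'
-- ===== SOURCE B (Python) =====
-- CATEGORY_TABLE = [
--     ('Discount Terms', ['discount', 'rebate']),
--     ('Penalty Terms', ['penalty', 'interest', 'late']),
--     ('Immediate Payment', ['instant', 'immediate', 'receipt', 'delivery', 'cod']),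
--     ('Deferred Payment', ['deferred', 'extended', 'postponed']),
--     ('Scheduled Payment', ['end of month', 'days after', 'proximo', 'fixed date']),
--     ('Letter of Credit', ['letter of credit', 'documentary credit']),
--     ('Cash/Cheque Payment', ['cash', 'certified cheque', 'cheque']),
--     ('Trade Instruments', ['bill of exchange', 'promissory note', 'draft']),
--     ('Factoring', ['factoring', 'factor']),
--     ('Installment Payment', ['installment', 'instalment', 'stage payment', 'progressive']),
--     ('Advance Payment', ['advance', 'prepay', 'deposit']),
--     ('Documentary Payment', ['against statement', 'against documents']),
--     ('Fixed Payment', ['lump sum', 'fixed fee']),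
--     ('Standard Terms', ['basic', 'normal', 'standard']),
--     ('Custom Terms', ['mixed', 'elective', 'mutually defined']),
-- ]
--
-- # Flat keyword index: (keyword, priority, label), priority = position of the
-- # category in A's branch order.
-- KEYWORD_INDEX = [(w, p, label)
--                  for p, (label, words) in enumerate(CATEGORY_TABLE)
--                  for w in words]
--
--
-- def categorize_payment_terms(code, name, description):
--     """Categorize payment terms codes based on their purpose"""
--     text = (name + ' ' + description).lower()
--     best_p, best_label = len(CATEGORY_TABLE), 'Other Terms'
--     for w, p, label in KEYWORD_INDEX:
--         if p < best_p and w in text: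
--             best_p, best_label = p, label
--     return best_label
-- ===== Notes on version B (the rewrite author's own statement) =====
-- stated objective: alternative
-- what changed: Replaces the ordered if/elif chain of per-category any() checks (first match returns immediately) by a single exhaustive pass over a flat keyword index that keeps the minimum-priority matching keyword in an accumulator; equal because priorities mirror A's branch order and the strict comparison keeps the highest-priority match.
import Mathlib
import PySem

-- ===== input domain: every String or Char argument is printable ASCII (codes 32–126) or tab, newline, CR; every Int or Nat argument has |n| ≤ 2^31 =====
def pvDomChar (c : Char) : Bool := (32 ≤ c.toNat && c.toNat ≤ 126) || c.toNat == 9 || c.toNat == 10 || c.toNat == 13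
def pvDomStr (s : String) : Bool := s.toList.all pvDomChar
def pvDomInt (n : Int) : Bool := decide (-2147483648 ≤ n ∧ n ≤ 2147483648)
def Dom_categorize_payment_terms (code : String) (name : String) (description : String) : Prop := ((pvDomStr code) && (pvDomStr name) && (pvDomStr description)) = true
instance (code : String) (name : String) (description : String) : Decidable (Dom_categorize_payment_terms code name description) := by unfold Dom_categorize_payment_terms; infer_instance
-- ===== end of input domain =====

-- ===== PORT A =====
-- B replaces A's early-exit if/elif chain by one exhaustive pass over a flat keyword index
-- keeping the minimum-priority match (alternative decomposition; same cost).
-- Port of A: text = (name + ' ' + description).lower(); chain of `any(word in text ...)` branches.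
def categorize_payment_terms (code : String) (name : String) (description : String) : String :=
  let text : List Char := PySem.Chars.lower (name.toList ++ ' ' :: description.toList)
  if ["discount", "rebate"].any (fun w => PySem.Chars.isIn w.toList text) then "Discount Terms"
  else if ["penalty", "interest", "late"].any (fun w => PySem.Chars.isIn w.toList text) then "Penalty Terms"
  else if ["instant", "immediate", "receipt", "delivery", "cod"].any (fun w => PySem.Chars.isIn w.toList text) then "Immediate Payment"
  else if ["deferred", "extended", "postponed"].any (fun w => PySem.Chars.isIn w.toList text) then "Deferred Payment"
  else if ["end of month", "days after", "proximo", "fixed date"].any (fun w => PySem.Chars.isIn w.toList text) then "Scheduled Payment"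
  else if ["letter of credit", "documentary credit"].any (fun w => PySem.Chars.isIn w.toList text) then "Letter of Credit"
  else if ["cash", "certified cheque", "cheque"].any (fun w => PySem.Chars.isIn w.toList text) then "Cash/Cheque Payment"
  else if ["bill of exchange", "promissory note", "draft"].any (fun w => PySem.Chars.isIn w.toList text) then "Trade Instruments"
  else if ["factoring", "factor"].any (fun w => PySem.Chars.isIn w.toList text) then "Factoring"
  else if ["installment", "instalment", "stage payment", "progressive"].any (fun w => PySem.Chars.isIn w.toList text) then "Installment Payment"
  else if ["advance", "prepay", "deposit"].any (fun w => PySem.Chars.isIn w.toList text) then "Advance Payment"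
  else if ["against statement", "against documents"].any (fun w => PySem.Chars.isIn w.toList text) then "Documentary Payment"
  else if ["lump sum", "fixed fee"].any (fun w => PySem.Chars.isIn w.toList text) then "Fixed Payment"
  else if ["basic", "normal", "standard"].any (fun w => PySem.Chars.isIn w.toList text) then "Standard Terms"
  else if ["mixed", "elective", "mutually defined"].any (fun w => PySem.Chars.isIn w.toList text) then "Custom Terms"
  else "Other Terms"

-- ===== PORT B =====
-- Source B: CATEGORY_TABLE.
def pvCategoryTable : List (String × List String) :=
  [("Discount Terms", ["discount", "rebate"]),
   ("Penalty Terms", ["penalty", "interest", "late"]),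
   ("Immediate Payment", ["instant", "immediate", "receipt", "delivery", "cod"]),
   ("Deferred Payment", ["deferred", "extended", "postponed"]),
   ("Scheduled Payment", ["end of month", "days after", "proximo", "fixed date"]),
   ("Letter of Credit", ["letter of credit", "documentary credit"]),
   ("Cash/Cheque Payment", ["cash", "certified cheque", "cheque"]),
   ("Trade Instruments", ["bill of exchange", "promissory note", "draft"]),
   ("Factoring", ["factoring", "factor"]),
   ("Installment Payment", ["installment", "instalment", "stage payment", "progressive"]),
   ("Advance Payment", ["advance", "prepay", "deposit"]),
   ("Documentary Payment", ["against statement", "against documents"]),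
   ("Fixed Payment", ["lump sum", "fixed fee"]),
   ("Standard Terms", ["basic", "normal", "standard"]),
   ("Custom Terms", ["mixed", "elective", "mutually defined"])]

-- Source B: KEYWORD_INDEX, the flat (keyword, priority, label) list built by enumeration.
def pvKeywordIndex : List (List Char × Nat × String) :=
  (List.zipIdx pvCategoryTable).flatMap
    (fun e => e.1.2.map (fun w => (w.toList, e.2, e.1.1)))

-- Source B's loop body: `if p < best_p and w in text: best_p, best_label = p, label`.
def pvStep (text : List Char) (best : Nat × String) (e : List Char × Nat × String) : Nat × String :=
  if e.2.1 < best.1 ∧ PySem.Chars.isIn e.1 text = true then (e.2.1, e.2.2) else best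

def categorize_payment_terms_alt (code : String) (name : String) (description : String) : String :=
  let text : List Char := PySem.Chars.lower (name.toList ++ ' ' :: description.toList)
  (pvKeywordIndex.foldl (pvStep text) (pvCategoryTable.length, "Other Terms")).2

-- ===== PRECONDITION & SPEC =====
def Spec_categorize_payment_terms (code : String) (name : String) (description : String) (out : String) : Prop := out = categorize_payment_terms_alt code name description
instance (code : String) (name : String) (description : String) (out : String) : Decidable (Spec_categorize_payment_terms code name description out) := by unfold Spec_categorize_payment_terms; infer_instance

-- ===== CLAIM (what is proved, stated in full; the proofs are below) =====
def Claim_equal_categorize_payment_terms : Prop := ∀ (code : String) (name : String) (description : String), Dom_categorize_payment_terms code name description → Spec_categorize_payment_terms code name description (categorize_payment_terms code name description)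

-- ===== LEMMAS AND PROOFS =====

-- flatFrom p cats: the keyword index of cats with priorities starting at p.
def pvFlatFrom (p : Nat) : List (String × List String) → List (List Char × Nat × String)
  | [] => []
  | (l, ws) :: rest => ws.map (fun w => (w.toList, p, l)) ++ pvFlatFrom (p + 1) rest

-- first matching category, as (index within cats, label)
def pvFirstIdx (text : List Char) : List (String × List String) → Option (Nat × String)
  | [] => none
  | (l, ws) :: rest =>
      if ws.any (fun w => PySem.Chars.isIn w.toList text) then some (0, l)
      else (pvFirstIdx text rest).map (fun q => (q.1 + 1, q.2))

lemma pvFlatFrom_prio_ge (p : Nat) (cats : List (String × List String)) :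
    ∀ e ∈ pvFlatFrom p cats, p ≤ e.2.1 := by
  induction cats generalizing p with
  | nil => simp [pvFlatFrom]
  | cons c rest ih =>
      intro e he
      obtain ⟨l, ws⟩ := c
      simp only [pvFlatFrom, List.mem_append, List.mem_map] at he
      rcases he with ⟨w, _, rfl⟩ | he
      · exact le_refl p
      · exact Nat.le_of_succ_le (ih (p + 1) e he)

lemma pvFold_ge (text : List Char) (xs : List (List Char × Nat × String)) (acc : Nat × String)
    (h : ∀ e ∈ xs, acc.1 ≤ e.2.1) : xs.foldl (pvStep text) acc = acc := by
  induction xs with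
  | nil => rfl
  | cons e rest ih =>
      have h1 : acc.1 ≤ e.2.1 := h e (List.mem_cons_self ..)
      have : pvStep text acc e = acc := by
        unfold pvStep; rw [if_neg]; rintro ⟨hlt, _⟩; omega
      rw [List.foldl_cons, this]
      exact ih (fun e' he' => h e' (List.mem_cons_of_mem _ he'))

lemma pvFold_group (text : List Char) (ws : List String) (p : Nat) (l : String)
    (acc : Nat × String) (hp : p < acc.1) :
    (ws.map (fun w => (w.toList, p, l))).foldl (pvStep text) acc
      = if ws.any (fun w => PySem.Chars.isIn w.toList text) then (p, l) else acc := by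
  induction ws generalizing acc with
  | nil => simp
  | cons w rest ih =>
      simp only [List.map_cons, List.foldl_cons, List.any_cons]
      by_cases hw : PySem.Chars.isIn w.toList text = true
      · have hstep : pvStep text acc (w.toList, p, l) = (p, l) := by
          unfold pvStep; rw [if_pos ⟨hp, hw⟩]
        rw [hstep, pvFold_ge text _ (p, l) ?_]
        · simp [hw]
        · intro e he
          simp only [List.mem_map] at he
          obtain ⟨w', _, rfl⟩ := he
          exact le_refl p
      · have hstep : pvStep text acc (w.toList, p, l) = acc := by
          unfold pvStep; rw [if_neg]; rintro ⟨_, h⟩; exact hw h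
        rw [hstep, ih acc hp]
        simp [hw]

-- resolve the result of the pass: accumulator if no match, else the matched (priority, label)
def pvAccOf (acc : Nat × String) (p : Nat) : Option (Nat × String) → Nat × String
  | none => acc
  | some q => (p + q.1, q.2)

def pvLabelOf (d : String) : Option (Nat × String) → String
  | none => d
  | some q => q.2

lemma pvFold_flatFrom (text : List Char) (cats : List (String × List String)) (p : Nat)
    (acc : Nat × String) (hacc : p + cats.length ≤ acc.1) :
    (pvFlatFrom p cats).foldl (pvStep text) acc = pvAccOf acc p (pvFirstIdx text cats) := by
  induction cats generalizing p acc with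
  | nil => simp [pvFlatFrom, pvFirstIdx, pvAccOf]
  | cons c rest ih =>
      obtain ⟨l, ws⟩ := c
      have hp : p < acc.1 := by simp at hacc; omega
      simp only [pvFlatFrom, pvFirstIdx, List.foldl_append]
      rw [pvFold_group text ws p l acc hp]
      by_cases hany : ws.any (fun w => PySem.Chars.isIn w.toList text) = true
      · rw [if_pos hany, if_pos hany]
        rw [pvFold_ge text _ (p, l) ?_]
        · simp [pvAccOf]
        · intro e he
          exact Nat.le_of_lt (Nat.lt_of_lt_of_le (Nat.lt_succ_self p)
            (pvFlatFrom_prio_ge (p + 1) rest e he))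
      · rw [if_neg hany, if_neg hany]
        rw [ih (p + 1) acc (by simp at hacc ⊢; omega)]
        cases h : pvFirstIdx text rest with
        | none => simp [pvAccOf]
        | some q => simp [pvAccOf]; omega

lemma pvAcc_snd (acc : Nat × String) (p : Nat) (o : Option (Nat × String)) :
    (pvAccOf acc p o).2 = pvLabelOf acc.2 o := by cases o <;> rfl

lemma pvLabel_cons (text : List Char) (d l : String) (ws : List String)
    (rest : List (String × List String)) :
    pvLabelOf d (pvFirstIdx text ((l, ws) :: rest))
      = if (ws.any fun w => PySem.Chars.isIn w.toList text) = true then l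
        else pvLabelOf d (pvFirstIdx text rest) := by
  simp only [pvFirstIdx]
  by_cases hany : (ws.any fun w => PySem.Chars.isIn w.toList text) = true
  · simp [hany, pvLabelOf]
  · simp only [hany, if_false, Bool.false_eq_true]
    cases pvFirstIdx text rest <;> simp [pvLabelOf]

lemma pvLabel_nil (text : List Char) (d : String) : pvLabelOf d (pvFirstIdx text []) = d := rfl

lemma pvKeywordIndex_eq : pvKeywordIndex = pvFlatFrom 0 pvCategoryTable := by decide

-- ===== VERDICT (by name: the statement is the Claim_ definition above) =====
theorem categorize_payment_terms_spec : Claim_equal_categorize_payment_terms := by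
  intro code name description _
  unfold Spec_categorize_payment_terms categorize_payment_terms categorize_payment_terms_alt
  simp only [pvKeywordIndex_eq]
  generalize PySem.Chars.lower (name.toList ++ ' ' :: description.toList) = text
  rw [pvFold_flatFrom text pvCategoryTable 0 _ (by simp), pvAcc_snd]
  simp only [pvCategoryTable, pvLabel_cons, pvLabel_nil]
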